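-- pv_equiv track=rewrite | github.com/Judongsung/algorithm | 백준/Gold/15683. 감시/감시.py | see_right
-- ===== SOURCE A (Python) =====
-- def see_right(r, c, board, m):
--     sight = set()
--     count = 0
--     i = 1
--     while c+i < m and board[r][c+i] != '6':
--         if board[r][c+i] == '0':
--             sight.add((r, c+i))
--         i += 1
--     return sight
-- ===== SOURCE B (Python) =====
-- def see_right(r, c, board, m):
--     # Divide and conquer over the column range (c+1, m): each sub-range reports the
--     # '0'-cells visible from its left edge and whether it contains a blocking '6';
--     # a blocked left half hides the right half entirely (which is then never read).
--     def go(lo, hi):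
--         n = hi - lo
--         if n <= 0:
--             return set(), False
--         if n == 1:
--             cell = board[r][lo]
--             if cell == '6':
--                 return set(), True
--             return ({(r, lo)} if cell == '0' else set()), False
--         mid = (lo + hi) // 2
--         ls, lb = go(lo, mid)
--         if lb:
--             return ls, True
--         rs, rb = go(mid, hi)
--         return ls | rs, rb
--     return go(c + 1, m)[0]
-- ===== Notes on version B (the rewrite author's own statement) =====
-- stated objective: alternative
-- what changed: B replaces A's left-to-right while-loop with a divide-and-conquer over the column range: each half returns (visible '0'-cells, blocked-by-'6' flag) and the combine step drops the right half when the left is blocked, instead of a sequential scan that breaks at the first wall.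
import Mathlib
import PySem

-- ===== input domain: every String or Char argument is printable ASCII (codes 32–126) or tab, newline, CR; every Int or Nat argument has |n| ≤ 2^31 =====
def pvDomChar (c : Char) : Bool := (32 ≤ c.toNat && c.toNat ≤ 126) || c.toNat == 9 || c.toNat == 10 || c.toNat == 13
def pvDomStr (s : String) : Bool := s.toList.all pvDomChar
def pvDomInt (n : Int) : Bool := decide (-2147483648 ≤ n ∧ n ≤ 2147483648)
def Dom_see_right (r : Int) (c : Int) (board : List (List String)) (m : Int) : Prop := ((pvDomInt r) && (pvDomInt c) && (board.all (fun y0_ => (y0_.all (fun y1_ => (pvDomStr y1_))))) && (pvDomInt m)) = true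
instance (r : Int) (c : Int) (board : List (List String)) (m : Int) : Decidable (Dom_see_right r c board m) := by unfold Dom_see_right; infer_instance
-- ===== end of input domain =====

-- B replaces A's sequential break-at-first-wall scan by a divide-and-conquer over the
-- column range with a (cells, blocked) combine; objective: alternative, not faster.

-- termination measures for the ports (cited by name in decreasing_by)
lemma pvDecLoop (c m i : Int) (h : c + i < m) : (m - (c + (i + 1))).toNat < (m - (c + i)).toNat := by
  omega

lemma pvDecGoL (lo hi : Int) (h0 : ¬hi - lo ≤ 0) (_h1 : ¬hi - lo = 1) :
    (PySem.Int.floordiv (lo + hi) 2 - lo).toNat < (hi - lo).toNat := by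
  rw [PySem.Int.floordiv_eq_ediv_of_pos (by omega)]; omega

lemma pvDecGoR (lo hi : Int) (h0 : ¬hi - lo ≤ 0) (h1 : ¬hi - lo = 1) :
    (hi - PySem.Int.floordiv (lo + hi) 2).toNat < (hi - lo).toNat := by
  rw [PySem.Int.floordiv_eq_ediv_of_pos (by omega)]; omega

-- ===== PORT A =====
-- A's while loop: state (i, sight); stops on c+i ≥ m, a '6' cell, or an IndexError (outside Pre_).
def seeRightLoop (r : Int) (c : Int) (board : List (List String)) (m : Int) (i : Int)
    (sight : PySem.Set (Int × Int)) : PySem.Set (Int × Int) :=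
  if _h : c + i < m then
    match (PySem.List.pyGet? board r).bind (fun row => PySem.List.pyGet? row (c + i)) with
    | none => sight              -- IndexError in Python: these inputs are excluded by Pre_
    | some cell =>
      if cell = "6" then sight
      else seeRightLoop r c board m (i + 1)
        (if cell = "0" then PySem.Set.add sight (r, c + i) else sight)
  else sight
termination_by (m - (c + i)).toNat
decreasing_by exact pvDecLoop c m i _h

def see_right (r : Int) (c : Int) (board : List (List String)) (m : Int) : List (Int × Int) :=
  seeRightLoop r c board m 1 PySem.Set.empty

-- ===== PORT B =====
-- B's go(lo, hi): divide and conquer; returns (visible '0'-cells of the range, blocked flag).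
def seeRightGo (r : Int) (board : List (List String)) (lo : Int) (hi : Int) :
    List (Int × Int) × Bool :=
  if _h0 : hi - lo ≤ 0 then (PySem.Set.empty, false)
  else if _h1 : hi - lo = 1 then
    match (PySem.List.pyGet? board r).bind (fun row => PySem.List.pyGet? row lo) with
    | none => (PySem.Set.empty, true)   -- IndexError in Python (excluded by Pre_); blocked, so nothing to its right is used
    | some cell =>
      if cell = "6" then (PySem.Set.empty, true)
      else ((if cell = "0" then PySem.Set.ofList [(r, lo)] else PySem.Set.empty), false)
  else
    let mid := PySem.Int.floordiv (lo + hi) 2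
    let l := seeRightGo r board lo mid
    if l.2 then (l.1, true)
    else
      let rr := seeRightGo r board mid hi
      (PySem.Set.union l.1 rr.1, rr.2)
termination_by (hi - lo).toNat
decreasing_by
  · exact pvDecGoL lo hi _h0 _h1
  · exact pvDecGoR lo hi _h0 _h1

def see_right_alt (r : Int) (c : Int) (board : List (List String)) (m : Int) : List (Int × Int) :=
  (seeRightGo r board (c + 1) m).1

-- ===== PRECONDITION & SPEC =====
-- Pre_ excludes exactly the inputs on which Python A raises IndexError: r out of range for board
-- (when the loop body is reached at all), or the scan reaching an index outside board[r]'s valid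
-- (negative-wrapping) index range before hitting m or a '6'. (B raises there too.)
def Pre_see_right (r : Int) (c : Int) (board : List (List String)) (m : Int) : Prop :=
  m ≤ c + 1 ∨
  ((PySem.List.pyGet? board r).isSome = true ∧
   (let row := (PySem.List.pyGet? board r).getD [];
    -((row.length : Int)) ≤ c + 1 ∧
    (m ≤ max (c + 1) (row.length : Int) ∨
     ∃ j ∈ PySem.List.pyRange (c + 1) (max (c + 1) (row.length : Int)) 1,
       PySem.List.pyGet? row j = some "6")))
instance (r : Int) (c : Int) (board : List (List String)) (m : Int) : Decidable (Pre_see_right r c board m) := by unfold Pre_see_right; infer_instance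

def pvWitness_see_right : Int × Int × List (List String) × Int :=
  (0, 0, [["0", "1", "0", "6", "0"]], 5)

def Spec_see_right (r : Int) (c : Int) (board : List (List String)) (m : Int) (out : List (Int × Int)) : Prop := out = see_right_alt r c board m
instance (r : Int) (c : Int) (board : List (List String)) (m : Int) (out : List (Int × Int)) : Decidable (Spec_see_right r c board m out) := by unfold Spec_see_right; infer_instance

-- ===== CLAIM (what is proved, stated in full; the proofs are below) =====
def Claim_equal_see_right : Prop := ∀ (r : Int) (c : Int) (board : List (List String)) (m : Int), Dom_see_right r c board m → Pre_see_right r c board m → Spec_see_right r c board m (see_right r c board m)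

-- ===== LEMMAS AND PROOFS =====

lemma pvDecLin (lo hi : Int) (h : lo < hi) : (hi - (lo + 1)).toNat < (hi - lo).toNat := by
  omega

-- Ghost linear scan bridging the two recursion shapes: left-to-right, stop at '6'/IndexError.
def linScan (r : Int) (board : List (List String)) (lo : Int) (hi : Int) :
    List (Int × Int) × Bool :=
  if _h : lo < hi then
    match (PySem.List.pyGet? board r).bind (fun row => PySem.List.pyGet? row lo) with
    | none => ([], true)
    | some cell =>
      if cell = "6" then ([], true)
      else
        let t := linScan r board (lo + 1) hi
        ((if cell = "0" then [(r, lo)] else []) ++ t.1, t.2)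
  else ([], false)
termination_by (hi - lo).toNat
decreasing_by exact pvDecLin lo hi _h

lemma linScan_bounds (r : Int) (board : List (List String)) (lo hi : Int) :
    ∀ p ∈ (linScan r board lo hi).1, lo ≤ p.2 ∧ p.2 < hi := by
  fun_induction linScan r board lo hi with
  | case1 => simp
  | case2 => simp
  | case3 lo h cell hcell h6 t ih =>
    intro p hp
    rcases List.mem_append.mp hp with hp | hp
    · have hpe : p = (r, lo) := by split at hp <;> simpa using hp
      subst hpe; constructor <;> omega
    · have := ih p hp; omega
  | case4 => simp

lemma linScan_nodup (r : Int) (board : List (List String)) (lo hi : Int) :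
    (linScan r board lo hi).1.Nodup := by
  fun_induction linScan r board lo hi with
  | case1 => simp
  | case2 => simp
  | case3 lo h cell hcell h6 t ih =>
    show ((if cell = "0" then [(r, lo)] else []) ++ (linScan r board (lo + 1) hi).1).Nodup
    by_cases h0c : cell = "0"
    · rw [if_pos h0c, List.singleton_append]
      refine List.nodup_cons.mpr ⟨?_, ih⟩
      intro hm
      have := (linScan_bounds r board (lo + 1) hi _ hm).1
      simp at this
    · rw [if_neg h0c, List.nil_append]; exact ih
  | case4 => simp

-- Set.union on disjoint nodup lists is append.
lemma union_append {α : Type} [BEq α] [LawfulBEq α] (s t : List α)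
    (hd : ∀ y ∈ t, y ∉ s) (hn : t.Nodup) : PySem.Set.union s t = s ++ t := by
  induction t generalizing s with
  | nil => simp [PySem.Set.union, PySem.Set.update]
  | cons y t ih =>
    have h1 : PySem.Set.add s y = s ++ [y] :=
      PySem.Set.add_of_not_mem (hd y (by simp))
    have h2 : PySem.Set.union s (y :: t) = PySem.Set.union (PySem.Set.add s y) t := by
      simp [PySem.Set.union, PySem.Set.update]
    rw [h2, h1, ih (s ++ [y])
      (by intro z hz; simp only [List.mem_append, List.mem_singleton]
          rintro (h | rfl)
          · exact hd z (by simp [hz]) h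
          · exact (List.nodup_cons.mp hn).1 hz)
      (List.nodup_cons.mp hn).2]
    simp

-- linScan splits at any midpoint.
lemma linScan_split (r : Int) (board : List (List String)) (lo k hi : Int)
    (h1 : lo ≤ k) (h2 : k ≤ hi) :
    linScan r board lo hi =
      (if (linScan r board lo k).2 then ((linScan r board lo k).1, true)
       else ((linScan r board lo k).1 ++ (linScan r board k hi).1,
             (linScan r board k hi).2)) := by
  suffices H : ∀ (n : Nat) (lo : Int), (k - lo).toNat = n → lo ≤ k →
      linScan r board lo hi =
        (if (linScan r board lo k).2 then ((linScan r board lo k).1, true)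
         else ((linScan r board lo k).1 ++ (linScan r board k hi).1,
               (linScan r board k hi).2)) by
    exact H _ lo rfl h1
  intro n
  induction n with
  | zero =>
    intro lo hn hlo
    have : lo = k := by omega
    subst this
    rw [show linScan r board lo lo = ([], false) by rw [linScan]; simp]
    simp
  | succ n ih =>
    intro lo hn hlo
    have hlk : lo < k := by omega
    have hlh : lo < hi := by omega
    rw [linScan, dif_pos hlh, show linScan r board lo k = _ from by rw [linScan], dif_pos hlk]
    cases hcell : (PySem.List.pyGet? board r).bind (fun row => PySem.List.pyGet? row lo) with
    | none => simp
    | some cell =>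
      by_cases h6 : cell = "6"
      · simp [h6]
      · simp only [if_neg h6]
        have := ih (lo + 1) (by omega) (by omega)
        rw [this]
        by_cases hb : (linScan r board (lo + 1) k).2
        · simp [hb]
        · simp [hb]

-- the D&C computes the linear scan's result.
lemma seeRightGo_eq_linScan (r : Int) (board : List (List String)) (lo hi : Int) :
    seeRightGo r board lo hi = linScan r board lo hi := by
  fun_induction seeRightGo r board lo hi with
  | case1 lo hi h0 =>
    rw [linScan, dif_neg (by omega)]; rfl
  | case2 lo hi h0 h1 hcell =>
    rw [linScan, dif_pos (by omega), hcell]; rfl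
  | case3 lo hi h0 h1 hcell =>
    rw [linScan, dif_pos (by omega), hcell]; simp
  | case4 lo hi h0 h1 cell hcell h6 =>
    rw [linScan, dif_pos (by omega), hcell,
      show linScan r board (lo + 1) hi = ([], false) from by rw [linScan, dif_neg (by omega)]]
    by_cases h0c : cell = "0" <;>
      simp [h0c, h6, PySem.Set.ofList, PySem.Set.empty, PySem.Set.add, List.foldl]
  | case5 lo hi h0 h1 mid l hb ihl =>
    have hdef : mid = PySem.Int.floordiv (lo + hi) 2 := rfl
    have hed := PySem.Int.floordiv_eq_ediv_of_pos (a := lo + hi) (b := 2) (by omega)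
    have hA : lo ≤ mid := by omega
    have hB : mid ≤ hi := by omega
    have hb' : (linScan r board lo mid).2 = true := by rw [← ihl]; exact hb
    show ((seeRightGo r board lo mid).1, true) = linScan r board lo hi
    rw [ihl, linScan_split r board lo mid hi hA hB, if_pos hb']
  | case6 lo hi h0 h1 mid l hb rr ihl ihr =>
    have hdef : mid = PySem.Int.floordiv (lo + hi) 2 := rfl
    have hed := PySem.Int.floordiv_eq_ediv_of_pos (a := lo + hi) (b := 2) (by omega)
    have hA : lo ≤ mid := by omega
    have hB : mid ≤ hi := by omega
    have hdisj : ∀ y ∈ (linScan r board mid hi).1, y ∉ (linScan r board lo mid).1 := by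
      intro y hy hmem
      have hR := (linScan_bounds r board mid hi y hy).1
      have hL := (linScan_bounds r board lo mid y hmem).2
      omega
    have hb' : (linScan r board lo mid).2 = false := by rw [← ihl]; simpa using hb
    show (PySem.Set.union (seeRightGo r board lo mid).1 (seeRightGo r board mid hi).1,
          (seeRightGo r board mid hi).2) = linScan r board lo hi
    rw [ihl, ihr, union_append _ _ hdisj (linScan_nodup r board mid hi),
      linScan_split r board lo mid hi hA hB, if_neg (by simp [hb'])]

-- A's loop appends the linear scan's cells to the accumulator.
lemma seeRightLoop_eq (r : Int) (c : Int) (board : List (List String)) (m : Int) :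
    ∀ (i : Int) (sight : List (Int × Int)), (∀ j : Int, c + i ≤ j → (r, j) ∉ sight) →
      seeRightLoop r c board m i sight = sight ++ (linScan r board (c + i) m).1 := by
  suffices H : ∀ (n : Nat) (i : Int) (sight : List (Int × Int)), (m - (c + i)).toNat = n →
      (∀ j : Int, c + i ≤ j → (r, j) ∉ sight) →
      seeRightLoop r c board m i sight = sight ++ (linScan r board (c + i) m).1 by
    exact fun i sight h => H _ i sight rfl h
  intro n
  induction n using Nat.strong_induction_on with
  | _ n ih =>
    intro i sight hn hinv
    rw [seeRightLoop, linScan]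
    by_cases h : c + i < m
    · simp only [dif_pos h]
      cases hcell : (PySem.List.pyGet? board r).bind (fun row => PySem.List.pyGet? row (c + i)) with
      | none => simp
      | some cell =>
        by_cases h6 : cell = "6"
        · simp [h6]
        · simp only [if_neg h6]
          have hstep : c + (i + 1) = (c + i) + 1 := by ring
          have hrec := ih (m - (c + (i + 1))).toNat (by omega) (i + 1)
          by_cases h0 : cell = "0"
          · have hadd : PySem.Set.add sight (r, c + i) = sight ++ [(r, c + i)] :=
              PySem.Set.add_of_not_mem (hinv (c + i) le_rfl)
            have hinv' : ∀ j : Int, c + (i + 1) ≤ j → (r, j) ∉ sight ++ [(r, c + i)] := by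
              intro j hj hmem
              rcases List.mem_append.mp hmem with hmem | hmem
              · exact hinv j (by omega) hmem
              · have : j = c + i := by simpa using hmem
                omega
            have := hrec (sight ++ [(r, c + i)]) rfl hinv'
            rw [hstep] at this
            simp only [if_pos h0, hadd, this]
            simp [List.append_assoc]
          · have := hrec sight rfl (fun j hj => hinv j (by omega))
            rw [hstep] at this
            simp only [if_neg h0, this]
            simp
    · simp [dif_neg h]

theorem see_right_spec : Claim_equal_see_right := by
  intro r c board m _hdom _hpre
  unfold Spec_see_right see_right see_right_alt
  rw [seeRightLoop_eq r c board m 1 PySem.Set.empty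
    (by intro j _ hmem; simp [PySem.Set.empty] at hmem)]
  rw [seeRightGo_eq_linScan]
  simp [PySem.Set.empty]
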